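-- pv_equiv track=rewrite | github.com/webdevlex/algorithms-in-python | assesments/Citadel/Hacker Team.py | hackerTeam
-- ===== SOURCE A (Python) =====
-- def hackerTeam(team_a, team_b):
--     result = 0
--     for i in range(len(team_a)):
--         currentResult = 0
--         currentValue = 0
--         for j in range(i, len(team_a)):
--             if team_a[j] >= currentValue and team_a[j] <= team_b[j]:
--                 currentResult += 1
--                 currentValue = team_a[j]
--             elif team_b[j] >= currentValue:
--                 currentResult += 1
--                 currentValue = team_b[j]
--             else:
--                 break
--         if currentResult > result:
--             result = currentResult
--     return result
-- ===== SOURCE B (Python) =====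
-- def hackerTeam(team_a, team_b):
--     # O(n) right-to-left DP: g(i, v), the greedy run length from i with floor v,
--     # takes at most 3 values (v <= a[i], v <= b[i], else 0), so the whole
--     # function g(i, .) is summarised by the 4-tuple (a[i], b[i], g(i+1,a[i]), g(i+1,b[i])).
--     best = 0
--     state = None  # summary of g(i+1, .); None means i+1 == len (g == 0)
--     for i in range(len(team_a) - 1, -1, -1):
--         a = team_a[i]
--         b = team_b[i]
--         ga = _ev(a, state)
--         gb = _ev(b, state)
--         state = (a, b, ga, gb)
--         g0 = _ev(0, state)
--         if g0 > best:
--             best = g0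
--     return best
--
-- def _ev(v, state):
--     if state is None:
--         return 0
--     a, b, ga, gb = state
--     if a >= v and a <= b:
--         return 1 + ga
--     if b >= v:
--         return 1 + gb
--     return 0
-- ===== Notes on version B (the rewrite author's own statement) =====
-- stated objective: faster
-- what changed: A restarts the greedy scan from every index (nested loops); B makes one right-to-left pass maintaining a constant-size summary (a[i], b[i], g(i+1,a[i]), g(i+1,b[i])) of the run-length function g(i,.), which takes at most three values per position, and reads the answer g(i,0) at each step.
import Mathlib
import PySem

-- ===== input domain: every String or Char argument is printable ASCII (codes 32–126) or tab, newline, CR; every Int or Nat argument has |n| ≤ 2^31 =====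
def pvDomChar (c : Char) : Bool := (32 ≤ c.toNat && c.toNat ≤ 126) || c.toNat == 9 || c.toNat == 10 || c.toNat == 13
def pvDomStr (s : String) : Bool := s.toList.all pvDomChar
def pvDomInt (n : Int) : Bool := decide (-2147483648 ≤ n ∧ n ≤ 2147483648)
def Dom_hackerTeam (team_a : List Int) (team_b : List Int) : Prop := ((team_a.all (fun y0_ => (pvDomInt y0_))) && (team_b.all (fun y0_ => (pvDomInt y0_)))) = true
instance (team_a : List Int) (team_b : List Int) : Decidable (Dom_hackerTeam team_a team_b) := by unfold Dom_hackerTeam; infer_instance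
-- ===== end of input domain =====

-- B replaces A's quadratic restart-from-every-index greedy by one right-to-left pass
-- maintaining a constant-size summary of the greedy run-length function.


-- ===== PORT A =====
-- inner loop of A: walk both lists in step (j from i upward), with
-- currentValue v and accumulator currentResult acc; `break` returns acc.
def runA : List Int → List Int → Int → Int → Int
  | a :: as, b :: bs, v, acc =>
      if a ≥ v ∧ a ≤ b then runA as bs a (acc + 1)
      else if b ≥ v then runA as bs b (acc + 1)
      else acc
  | _, _, _, acc => acc

def hackerTeam (team_a : List Int) (team_b : List Int) : Int :=
  (List.range team_a.length).foldl
    (fun result i =>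
      let currentResult := runA (team_a.drop i) (team_b.drop i) 0 0
      if currentResult > result then currentResult else result)
    0

-- ===== PORT B =====
-- _ev in Source B: evaluate the summarised run-length function at v
def evB (v : Int) : Option (Int × Int × Int × Int) → Int
  | none => 0
  | some (a, b, ga, gb) =>
      if a ≥ v ∧ a ≤ b then 1 + ga
      else if b ≥ v then 1 + gb
      else 0

-- Source B's loop runs i from len-1 down to 0; as a recursion the tail (as, bs) is
-- processed first and (state, best) is threaded back up.
def altGo : List Int → List Int → Option (Int × Int × Int × Int) × Int
  | a :: as, b :: bs =>
      let p := altGo as bs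
      let ga := evB a p.1
      let gb := evB b p.1
      let st' := some (a, b, ga, gb)
      let g0 := evB 0 st'
      (st', if g0 > p.2 then g0 else p.2)
  | _, _ => (none, 0)

def hackerTeam_alt (team_a : List Int) (team_b : List Int) : Int :=
  (altGo team_a team_b).2

-- ===== PRECONDITION & SPEC =====
-- Pre_ excludes exactly the inputs where A raises: whenever len(team_a) > len(team_b)
-- the outer loop reaches i = len(team_b) and team_b[i] raises IndexError.
def Pre_hackerTeam (team_a : List Int) (team_b : List Int) : Prop :=
  team_a.length ≤ team_b.length
instance (team_a : List Int) (team_b : List Int) : Decidable (Pre_hackerTeam team_a team_b) := by unfold Pre_hackerTeam; infer_instance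
def pvWitness_hackerTeam : List Int × List Int := ([1, 3, 2], [2, 3, 2])

def Spec_hackerTeam (team_a : List Int) (team_b : List Int) (out : Int) : Prop := out = hackerTeam_alt team_a team_b
instance (team_a : List Int) (team_b : List Int) (out : Int) : Decidable (Spec_hackerTeam team_a team_b out) := by unfold Spec_hackerTeam; infer_instance

-- ===== CLAIM (what is proved, stated in full; the proofs are below) =====
def Claim_equal_hackerTeam : Prop := ∀ (team_a : List Int) (team_b : List Int), Dom_hackerTeam team_a team_b → Pre_hackerTeam team_a team_b → Spec_hackerTeam team_a team_b (hackerTeam team_a team_b)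

-- ===== LEMMAS AND PROOFS =====

-- pure (accumulator-free) greedy run length
def run (as bs : List Int) (v : Int) : Int := runA as bs v 0

theorem runA_acc : ∀ (as bs : List Int) (v acc : Int), runA as bs v acc = acc + run as bs v := by
  intro as
  induction as with
  | nil => intro bs v acc; cases bs <;> simp [runA, run]
  | cons a as ih =>
      intro bs v acc
      cases bs with
      | nil => simp [runA, run]
      | cons b bs =>
          simp only [runA, run]
          split_ifs with h1 h2
          · rw [ih bs a (acc + 1), ih bs a (0 + 1)]; ring
          · rw [ih bs b (acc + 1), ih bs b (0 + 1)]; ring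
          · ring

theorem run_nil_right : ∀ (l : List Int) (v : Int), run l [] v = 0 := by
  intro l v; cases l <;> simp [run, runA]

-- the state returned by altGo summarises run: evaluating it at any v gives run
theorem evB_altGo : ∀ (as bs : List Int) (v : Int), evB v (altGo as bs).1 = run as bs v := by
  intro as
  induction as with
  | nil => intro bs v; cases bs <;> simp [altGo, evB, run, runA]
  | cons a as ih =>
      intro bs v
      cases bs with
      | nil => simp [altGo, evB, run_nil_right]
      | cons b bs =>
          show evB v (some (a, b, evB a (altGo as bs).1, evB b (altGo as bs).1)) = run (a :: as) (b :: bs) v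
          rw [ih bs a, ih bs b]
          simp only [evB, run, runA]
          split_ifs with h1 h2
          · rw [runA_acc as bs a (0 + 1)]; simp only [run]; omega
          · rw [runA_acc as bs b (0 + 1)]; simp only [run]; omega
          · rfl

-- the best returned by altGo is the max over all suffix starts of run at 0
theorem altGo_best : ∀ (as bs : List Int),
    (altGo as bs).2 = (List.range as.length).foldr (fun i r => max (run (as.drop i) (bs.drop i) 0) r) 0 := by
  intro as
  induction as with
  | nil => intro bs; cases bs <;> simp [altGo]
  | cons a as ih =>
      intro bs
      cases bs with
      | nil =>
          have hfold : ∀ (L : List ℕ) (f : ℕ → List Int),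
              L.foldr (fun i r => max (run (f i) [] 0) r) 0 = 0 := by
            intro L f
            induction L with
            | nil => simp
            | cons x L ihL => rw [List.foldr_cons, ihL, run_nil_right]; simp
          simp only [List.drop_nil, altGo]
          exact (hfold _ _).symm
      | cons b bs =>
          simp only [List.length_cons]
          rw [List.range_succ_eq_map]
          simp only [List.foldr_cons, List.foldr_map]
          have hdrop : ∀ (i : ℕ), (a :: as).drop (i + 1) = as.drop i := fun _ => rfl
          have hdropb : ∀ (i : ℕ), (b :: bs).drop (i + 1) = bs.drop i := fun _ => rfl
          simp only [Nat.succ_eq_add_one, hdrop, hdropb, List.drop_zero]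
          rw [← ih bs]
          show (let p := altGo as bs;
                let ga := evB a p.1; let gb := evB b p.1;
                let st' := some (a, b, ga, gb); let g0 := evB 0 st';
                ((st' : Option (Int × Int × Int × Int)), if g0 > p.2 then g0 else p.2)).2
               = max (run (a :: as) (b :: bs) 0) (altGo as bs).2
          have h0 : evB 0 (some (a, b, evB a (altGo as bs).1, evB b (altGo as bs).1))
              = run (a :: as) (b :: bs) 0 := by
            rw [evB_altGo, evB_altGo]
            simp only [evB, run, runA]
            split_ifs with h1 h2
            · rw [runA_acc as bs a (0 + 1)]; simp only [run]; omega
            · rw [runA_acc as bs b (0 + 1)]; simp only [run]; omega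
            · rfl
          simp only
          rw [h0]
          rcases max_cases (run (a :: as) (b :: bs) 0) (altGo as bs).2 with ⟨he, h⟩ | ⟨he, h⟩ <;>
            rw [he] <;> split_ifs <;> omega

-- A's foldl of "if cr > res then cr else res" is the same max-foldr
theorem foldl_max_eq_foldr : ∀ (L : List ℕ) (g : ℕ → Int) (c : Int), 0 ≤ c →
    L.foldl (fun r i => if g i > r then g i else r) c = max c (L.foldr (fun i r => max (g i) r) 0) := by
  intro L
  induction L with
  | nil =>
      intro g c hc
      simp only [List.foldl_nil, List.foldr_nil]
      omega
  | cons x L ih =>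
      intro g c hc
      simp only [List.foldl_cons, List.foldr_cons]
      rw [ih g (if g x > c then g x else c) (by split_ifs <;> omega)]
      rcases max_cases (g x) (L.foldr (fun i r => max (g i) r) 0) with ⟨he, _⟩ | ⟨he, _⟩ <;>
        rw [he] <;> split_ifs <;>
        rcases max_cases c (L.foldr (fun i r => max (g i) r) 0) with ⟨h1, h2⟩ | ⟨h1, h2⟩ <;>
        rcases max_cases (g x) (L.foldr (fun i r => max (g i) r) 0) with ⟨h3, h4⟩ | ⟨h3, h4⟩ <;>
        rcases max_cases c (g x) with ⟨h5, h6⟩ | ⟨h5, h6⟩ <;> omega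

theorem foldr_max_nonneg : ∀ (L : List ℕ) (g : ℕ → Int),
    (0 : Int) ≤ L.foldr (fun i r => max (g i) r) 0 := by
  intro L g
  induction L with
  | nil => simp
  | cons x L ih => simp only [List.foldr_cons]; exact le_max_of_le_right ih

-- ===== VERDICT (by name: the statement is the Claim_ definition above) =====
theorem hackerTeam_spec : Claim_equal_hackerTeam := by
  intro team_a team_b _ _
  show hackerTeam team_a team_b = hackerTeam_alt team_a team_b
  unfold hackerTeam hackerTeam_alt
  rw [altGo_best]
  have h := foldl_max_eq_foldr (List.range team_a.length)
      (fun i => run (team_a.drop i) (team_b.drop i) 0) 0 le_rfl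
  simp only [run] at h ⊢
  rw [h, max_eq_right (foldr_max_nonneg _ _)]
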